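-- pv_equiv track=rewrite | github.com/MRo47/ProjectUNAV | NavUsingDepth.py | ScanLineGenerator
-- ===== SOURCE A (Python) =====
-- def ScanLineGenerator(x): #center first border last scan
--     x_center = int(x/2)
--     x_line = [0 for a in range(x)]
--     x_line[0] = x_center
--     x_sign = -1
--     for i in range(x-1):
--         x_line[i+1] = x_line[i] + x_sign*(i+1)
--         x_sign = -1*x_sign
--     return x_line
-- ===== SOURCE B (Python) =====
-- def ScanLineGenerator(x):
--     x_center = int(x/2)
--     x_line = [0] * x
--     x_line[0] = x_center
--     for k in range(1, x):
--         x_line[k] = x_center + (k//2 if k % 2 == 0 else -((k+1)//2))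
--     return x_line
-- ===== Notes on version B (the rewrite author's own statement) =====
-- stated objective: alternative
-- what changed: Each offset is computed directly from its index and parity (x_center + (k//2 if k even else -((k+1)//2))) instead of being accumulated from the previous element with a toggling sign accumulator.
import Mathlib
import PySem

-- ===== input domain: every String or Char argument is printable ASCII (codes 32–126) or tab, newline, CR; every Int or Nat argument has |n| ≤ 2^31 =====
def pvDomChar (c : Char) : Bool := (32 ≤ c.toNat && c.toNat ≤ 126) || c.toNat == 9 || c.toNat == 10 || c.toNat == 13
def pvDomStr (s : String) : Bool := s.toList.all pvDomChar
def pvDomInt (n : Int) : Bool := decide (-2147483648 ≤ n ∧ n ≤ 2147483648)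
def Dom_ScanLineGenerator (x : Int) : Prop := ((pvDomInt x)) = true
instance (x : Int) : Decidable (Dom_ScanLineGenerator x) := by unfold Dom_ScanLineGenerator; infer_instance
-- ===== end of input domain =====

-- B computes every offset directly from its index and parity instead of A's running sum with a
-- toggling sign accumulator (objective: alternative decomposition, same cost).

-- ===== PORT A =====
-- x_center = int(x/2): for 1 ≤ x ≤ 2^31 the float x/2 is exact and int() truncates toward zero,
-- so this is exactly Int.tdiv x 2 (= x / 2 here since x ≥ 0 on Pre_).
def ScanLineGenerator (x : Int) : List Int :=
  let x_center := Int.tdiv x 2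
  let x_line := List.replicate x.toNat 0        -- [0 for a in range(x)]
  let x_line := x_line.set 0 x_center           -- x_line[0] = x_center (IndexError when x ≤ 0: excluded by Pre_)
  let st :=
    (PySem.List.pyRange 0 (x - 1) 1).foldl
      (fun (st : List Int × Int) i =>
        let line := st.1
        let x_sign := st.2
        (line.set (i + 1).toNat (PySem.List.pyGetD line i 0 + x_sign * (i + 1)), -1 * x_sign))
      (x_line, -1)
  st.1

-- ===== PORT B =====
def ScanLineGenerator_alt (x : Int) : List Int :=
  let x_center := Int.tdiv x 2
  let x_line := List.replicate x.toNat 0        -- [0] * x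
  let x_line := x_line.set 0 x_center           -- x_line[0] = x_center (IndexError when x ≤ 0: excluded by Pre_)
  (PySem.List.pyRange 1 x 1).foldl
    (fun line k =>
      line.set k.toNat
        (x_center + (if k % 2 = 0 then PySem.Int.floordiv k 2 else -(PySem.Int.floordiv (k + 1) 2))))
    x_line

-- ===== PRECONDITION & SPEC =====
-- Pre_ excludes exactly x ≤ 0, where 'x_line[0] = x_center' raises IndexError in both A and B.
def Pre_ScanLineGenerator (x : Int) : Prop := 1 ≤ x
instance (x : Int) : Decidable (Pre_ScanLineGenerator x) := by unfold Pre_ScanLineGenerator; infer_instance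
def pvWitness_ScanLineGenerator : Int := 7

def Spec_ScanLineGenerator (x : Int) (out : List Int) : Prop := out = ScanLineGenerator_alt x
instance (x : Int) (out : List Int) : Decidable (Spec_ScanLineGenerator x out) := by unfold Spec_ScanLineGenerator; infer_instance

-- ===== CLAIM =====
def Claim_equal_ScanLineGenerator : Prop := ∀ (x : Int), Dom_ScanLineGenerator x → Pre_ScanLineGenerator x → Spec_ScanLineGenerator x (ScanLineGenerator x)

-- ===== LEMMAS AND PROOFS =====

-- the direct per-index value B assigns (and A reaches by accumulation)
def slgVal (c : Int) (k : ℕ) : Int :=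
  c + (if k % 2 = 0 then ((k / 2 : ℕ) : Int) else -(((k + 1) / 2 : ℕ) : Int))

-- the line after the first t entries have been filled in
def slgPartial (n : ℕ) (c : Int) (t : ℕ) : List Int :=
  (List.range n).map (fun k => if k < t then slgVal c k else 0)

theorem slgPartial_init (n : ℕ) (c : Int) (h : 1 ≤ n) :
    (List.replicate n (0 : Int)).set 0 c = slgPartial n c 1 := by
  apply List.ext_getElem
  · simp [slgPartial]
  · intro i h1 h2
    simp only [List.getElem_set, List.getElem_replicate, slgPartial, List.getElem_map,
      List.getElem_range]
    rcases Nat.eq_zero_or_pos i with hi | hi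
    · subst hi; simp [slgVal]
    · rw [if_neg (by omega), if_neg (by omega)]

theorem slgPartial_set (n : ℕ) (c : Int) (t : ℕ) (h : t < n) :
    (slgPartial n c t).set t (slgVal c t) = slgPartial n c (t + 1) := by
  apply List.ext_getElem
  · simp [slgPartial]
  · intro i h1 h2
    simp only [List.getElem_set, slgPartial, List.getElem_map, List.getElem_range]
    split_ifs <;> simp_all <;> omega

theorem slgVal_step (c : Int) (m : ℕ) :
    slgVal c m + (if m % 2 = 0 then (-1 : Int) else 1) * ((m : Int) + 1) = slgVal c (m + 1) := by
  unfold slgVal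
  rcases Nat.even_or_odd m with ⟨j, hj⟩ | ⟨j, hj⟩ <;> subst hj <;>
    split_ifs <;> push_cast <;> omega

theorem slgGetD (n : ℕ) (c : Int) (t m : ℕ) (hm : m < t) (hn : m < n) :
    PySem.List.pyGetD (slgPartial n c t) (m : Int) 0 = slgVal c m := by
  rw [PySem.List.pyGetD_eq_getElem _ _ (by positivity)
    (by simp only [slgPartial, List.length_map, List.length_range]; exact_mod_cast hn)]
  simp [slgPartial, hm]

theorem slg_A_inv (n : ℕ) (c : Int) (m : ℕ) (h : m + 1 ≤ n) :
    (PySem.List.pyRange 0 (m : Int) 1).foldl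
      (fun (st : List Int × Int) i =>
        (st.1.set (i + 1).toNat (PySem.List.pyGetD st.1 i 0 + st.2 * (i + 1)), -1 * st.2))
      (slgPartial n c 1, -1)
    = (slgPartial n c (m + 1), if m % 2 = 0 then -1 else 1) := by
  induction m with
  | zero => simp [PySem.List.pyRange_one_eq_nil]
  | succ m ih =>
    rw [show ((m + 1 : ℕ) : Int) = (m : Int) + 1 by push_cast; ring,
      PySem.List.pyRange_one_succ_right (by positivity), List.foldl_append,
      ih (by omega)]
    simp only [List.foldl_cons, List.foldl_nil]
    have h1 : ((m : Int) + 1).toNat = m + 1 := by omega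
    rw [h1, slgGetD n c (m + 1) m (by omega) (by omega), slgVal_step, slgPartial_set n c (m + 1) (by omega)]
    have hs : (-1 : Int) * (if m % 2 = 0 then (-1 : Int) else 1)
        = if (m + 1) % 2 = 0 then (-1 : Int) else 1 := by
      rcases Nat.even_or_odd m with ⟨j, hj⟩ | ⟨j, hj⟩ <;> subst hj <;> split_ifs <;> omega
    rw [hs]

theorem slg_B_inv (n : ℕ) (c : Int) (m : ℕ) (h1 : 1 ≤ m) (h2 : m ≤ n) :
    (PySem.List.pyRange 1 (m : Int) 1).foldl
      (fun line k =>
        line.set k.toNat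
          (c + (if k % 2 = 0 then PySem.Int.floordiv k 2 else -(PySem.Int.floordiv (k + 1) 2))))
      (slgPartial n c 1)
    = slgPartial n c m := by
  induction m with
  | zero => omega
  | succ m ih =>
    rcases Nat.eq_zero_or_pos m with hm | hm
    · subst hm; simp [PySem.List.pyRange_one_eq_nil]
    · rw [show ((m + 1 : ℕ) : Int) = (m : Int) + 1 by push_cast; ring,
        PySem.List.pyRange_one_succ_right (by exact_mod_cast hm), List.foldl_append,
        ih hm (by omega)]
      simp only [List.foldl_cons, List.foldl_nil]
      have hv : (c + (if (m : Int) % 2 = 0 then PySem.Int.floordiv (m : Int) 2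
          else -(PySem.Int.floordiv ((m : Int) + 1) 2))) = slgVal c m := by
        unfold slgVal
        have e1 : PySem.Int.floordiv (m : Int) 2 = ((m / 2 : ℕ) : Int) := by
          simp [PySem.Int.floordiv, Int.fdiv_eq_ediv]; try omega
        have e2 : PySem.Int.floordiv ((m : Int) + 1) 2 = (((m + 1) / 2 : ℕ) : Int) := by
          simp [PySem.Int.floordiv, Int.fdiv_eq_ediv]; try omega
        have e3 : ((m : Int) % 2 = 0) ↔ (m % 2 = 0) := by omega
        rw [e1, e2]
        by_cases hpar : m % 2 = 0
        · rw [if_pos (e3.mpr hpar), if_pos hpar]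
        · rw [if_neg (fun hc => hpar (e3.mp hc)), if_neg hpar]
      have ht : ((m : Int)).toNat = m := by omega
      rw [ht, hv, slgPartial_set n c m (by omega)]

-- ===== VERDICT =====
theorem ScanLineGenerator_spec : Claim_equal_ScanLineGenerator := by
  intro x _ hpre
  have hx : 1 ≤ x := hpre
  obtain ⟨n, hxn⟩ : ∃ n : ℕ, x = (n : Int) := ⟨x.toNat, by omega⟩
  subst hxn
  have hn : (1 : ℕ) ≤ n := by exact_mod_cast hx
  unfold Spec_ScanLineGenerator ScanLineGenerator ScanLineGenerator_alt
  simp only [Int.toNat_natCast]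
  rw [slgPartial_init n (Int.tdiv (n : Int) 2) hn]
  have hA : ((n : Int) - 1) = ((n - 1 : ℕ) : Int) := by omega
  rw [hA, slg_A_inv n (Int.tdiv (n : Int) 2) (n - 1) (by omega),
    slg_B_inv n (Int.tdiv (n : Int) 2) n hn (le_refl n)]
  have h1 : n - 1 + 1 = n := by omega
  rw [h1]
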